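-- pv_equiv track=rewrite | github.com/chiralcentre/Kattis | checkmateinone.py | check
-- ===== SOURCE A (Python) =====
-- directions = [(1, 0), (-1, 0), (0, 1), (0, -1)]
--
-- def in_range(x,y):
--     return 0 <= x < 8 and 0 <= y < 8
--
-- def check_square(grid,x,y):
--     # check for kings
--     for i in range(-1, 2):
--         for j in range(-1, 2):
--             if in_range(x + i, y + j) and grid[x + i][y + j] == 'K':
--                 return False
--     # check for rooks
--     for a,b in directions:
--         c,d = x,y
--         while in_range(c + a,d + b):
--             c += a
--             d += b
--             if grid[c][d] == "R":
--                 return False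
--             if grid[c][d] == "K":
--                 break
--     return True
--
-- def safe(grid,opp_king):
--     x,y = opp_king
--     ok = False
--     for i in range(-1, 2):
--         for j in range(-1, 2):
--             if in_range(x + i, y + j):
--                 old = grid[x + i][y + j]
--                 grid[x + i][y + j] = '.'
--                 grid[x][y] = '.'
--                 ok = ok or check_square(grid, x + i, y + j)
--                 grid[x][y] = 'k'
--                 grid[x + i][y + j] = old
--     return ok
--
-- def check(grid,x,y,opp_king):
--     grid[x][y] = '.'
--     for dx, dy in directions:
--         newx, newy = x + dx, y + dy
--         while in_range(newx,newy) and grid[newx][newy] == ".":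
--             grid[newx][newy] = 'R'
--             if not safe(grid,opp_king):
--                 return True
--             grid[newx][newy] = '.'
--             newx += dx
--             newy += dy
--     grid[x][y] = 'R'
--     return False
-- ===== SOURCE B (Python) =====
-- # B: pure brute force over all 64 board squares with a clear-path predicate and a
-- # copy-based mate test, instead of A's mutating per-direction slide-and-test loop.
-- # Equivalence is about the RETURN value only: A mutates `grid` in place, B reads it.
-- directions = [(1, 0), (-1, 0), (0, 1), (0, -1)]
--
-- def in_range(x, y):
--     return 0 <= x < 8 and 0 <= y < 8
--
-- def check_square(grid, x, y):
--     # check for kings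
--     for i in range(-1, 2):
--         for j in range(-1, 2):
--             if in_range(x + i, y + j) and grid[x + i][y + j] == 'K':
--                 return False
--     # check for rooks
--     for a, b in directions:
--         c, d = x, y
--         while in_range(c + a, d + b):
--             c += a
--             d += b
--             if grid[c][d] == "R":
--                 return False
--             if grid[c][d] == "K":
--                 break
--     return True
--
-- def check(grid, x, y, opp_king):
--     kx, ky = opp_king
--     base = [row[:] for row in grid]
--     base[x][y] = '.'
--
--     def clear_path(r, c):
--         # rook moves from (x,y) to (r,c): same rank or file, every square on the
--         # way (target included) empty and on the board
--         if (r, c) == (x, y) or (r != x and c != y):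
--             return False
--         dr = (r > x) - (r < x)
--         dc = (c > y) - (c < y)
--         i, j = x + dr, y + dc
--         while (i, j) != (r, c):
--             if not in_range(i, j) or base[i][j] != '.':
--                 return False
--             i += dr
--             j += dc
--         return base[r][c] == '.'
--
--     def mates(r, c):
--         # with the rook on (r,c): no square next to (or under) the opposing king
--         # is safe for it
--         board = [row[:] for row in base]
--         board[r][c] = 'R'
--         for di in range(-1, 2):
--             for dj in range(-1, 2):
--                 a, b = kx + di, ky + dj
--                 if in_range(a, b):
--                     esc = [row[:] for row in board]
--                     esc[a][b] = '.'
--                     esc[kx][ky] = '.'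
--                     if check_square(esc, a, b):
--                         return False
--         return True
--
--     return any(clear_path(r, c) and mates(r, c)
--                for r in range(8) for c in range(8))
-- ===== Notes on version B (the rewrite author's own statement) =====
-- stated objective: alternative
-- what changed: check is re-done as a pure brute-force scan of all 64 board squares, each tested with a closed clear-path predicate and a copy-based mate test, instead of A's in-place per-direction slide that mutates the grid and calls safe after each step; B reads the grid only (A's in-place mutation is not reproduced).
import Mathlib
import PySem

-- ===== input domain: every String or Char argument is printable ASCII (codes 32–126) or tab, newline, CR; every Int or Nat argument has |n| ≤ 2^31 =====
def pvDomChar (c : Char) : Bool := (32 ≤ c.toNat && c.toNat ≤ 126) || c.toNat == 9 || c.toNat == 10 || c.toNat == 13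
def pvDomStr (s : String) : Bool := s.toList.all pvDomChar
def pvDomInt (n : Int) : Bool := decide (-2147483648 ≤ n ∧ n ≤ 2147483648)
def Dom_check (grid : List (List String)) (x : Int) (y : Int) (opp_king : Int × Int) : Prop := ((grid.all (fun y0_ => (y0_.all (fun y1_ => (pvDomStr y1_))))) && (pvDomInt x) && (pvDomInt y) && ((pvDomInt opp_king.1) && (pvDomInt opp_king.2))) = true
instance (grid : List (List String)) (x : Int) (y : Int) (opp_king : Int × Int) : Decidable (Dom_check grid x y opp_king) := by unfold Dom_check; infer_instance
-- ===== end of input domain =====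

-- B replaces A's in-place per-direction slide-and-test with a pure brute-force scan of
-- all 64 board squares (clear-path predicate + copy-based mate test); equivalence is
-- about the RETURN value only (Python A mutates `grid` in place, B only reads it).
-- Grid indexing below implements Python's semantics, including negative wraparound;
-- it is exact on Pre_check, which rules out every access Python raises on.

-- ===== PORT A =====
def pvDirections : List (Int × Int) := [(1, 0), (-1, 0), (0, 1), (0, -1)]

def pvPairs : List (Int × Int) :=
  [(-1,-1),(-1,0),(-1,1),(0,-1),(0,0),(0,1),(1,-1),(1,0),(1,1)]

def inRange (x y : Int) : Bool := decide (0 ≤ x ∧ x < 8) && decide (0 ≤ y ∧ y < 8)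

-- Nat-level cell access (shared by the Int-level wrappers below)
def nget (g : List (List String)) (r c : Nat) : String := (g.getD r []).getD c ""

def nset (g : List (List String)) (r c : Nat) (v : String) : List (List String) :=
  g.set r ((g.getD r []).set c v)

-- Python's effective index: negative indices count from the end
def pyIdx (n : Nat) (i : Int) : Int := if i < 0 then i + n else i

def rowIdx (g : List (List String)) (i : Int) : Nat := (pyIdx g.length i).toNat

def colIdx (g : List (List String)) (i j : Int) : Nat :=
  (pyIdx (g.getD (rowIdx g i) []).length j).toNat

-- grid[i][j] (read); exact on Pre_check (Python raises on the accesses Pre_ excludes)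
def gget (g : List (List String)) (i j : Int) : String := nget g (rowIdx g i) (colIdx g i j)

-- grid[i][j] = v (write); exact on Pre_check
def gset (g : List (List String)) (i j : Int) (v : String) : List (List String) :=
  nset g (rowIdx g i) (colIdx g i j) v

-- the while-loop of check_square's rook scan (fuel 8 ≥ any possible number of steps)
def rayHitsR (g : List (List String)) (a b : Int) : Int → Int → Nat → Bool
  | _, _, 0 => false
  | c, d, n+1 =>
    if inRange (c + a) (d + b) then
      if gget g (c + a) (d + b) = "R" then true
      else if gget g (c + a) (d + b) = "K" then false
      else rayHitsR g a b (c + a) (d + b) n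
    else false

def checkSquare (g : List (List String)) (x y : Int) : Bool :=
  if pvPairs.any (fun p => inRange (x + p.1) (y + p.2) && gget g (x + p.1) (y + p.2) == "K") then false
  else if pvDirections.any (fun p => rayHitsR g p.1 p.2 x y 8) then false
  else true

def safeStep (kx ky : Int) (st : Bool × List (List String)) (p : Int × Int) :
    Bool × List (List String) :=
  if inRange (kx + p.1) (ky + p.2) then
    let a := kx + p.1
    let b := ky + p.2
    let old := gget st.2 a b
    let g1 := gset st.2 a b "."
    let g2 := gset g1 kx ky "."
    let ok := st.1 || checkSquare g2 a b
    let g3 := gset g2 kx ky "k"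
    (ok, gset g3 a b old)
  else st

def safe (g : List (List String)) (k : Int × Int) : Bool × List (List String) :=
  pvPairs.foldl (safeStep k.1 k.2) (false, g)

-- A's per-direction while loop (fuel 8 suffices: newx,newy leave [0,8) after ≤ 8 steps)
def aDirLoop (kx ky dx dy : Int) : Int → Int → List (List String) → Nat → Bool × List (List String)
  | _, _, g, 0 => (false, g)
  | nx, ny, g, n+1 =>
    if inRange nx ny && gget g nx ny == "." then
      let g1 := gset g nx ny "R"
      let r := safe g1 (kx, ky)
      if !r.1 then (true, r.2)
      else aDirLoop kx ky dx dy (nx + dx) (ny + dy) (gset r.2 nx ny ".") n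
    else (false, g)

def check (grid : List (List String)) (x : Int) (y : Int) (opp_king : Int × Int) : Bool :=
  (pvDirections.foldl
    (fun st d => if st.1 then st
                 else aDirLoop opp_king.1 opp_king.2 d.1 d.2 (x + d.1) (y + d.2) st.2 8)
    (false, gset grid x y ".")).1

-- ===== PORT B =====
-- clear_path's while loop (fuel 8: once on the board, at most 8 cells are visited)
def walkPath (base : List (List String)) (dr dc r c : Int) : Int → Int → Nat → Bool
  | _, _, 0 => false
  | i, j, n+1 =>
    if i = r ∧ j = c then gget base r c == "."
    else if inRange i j && gget base i j == "." then walkPath base dr dc r c (i + dr) (j + dc) n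
    else false

def clearPath (base : List (List String)) (x y r c : Int) : Bool :=
  if (r = x ∧ c = y) ∨ (r ≠ x ∧ c ≠ y) then false
  else walkPath base (r - x).sign (c - y).sign r c (x + (r - x).sign) (y + (c - y).sign) 8

-- mates' double loop over the king's 9 squares, with its early return False
def matesLoop (kx ky : Int) (board : List (List String)) : List (Int × Int) → Bool
  | [] => true
  | p :: ps =>
    if inRange (kx + p.1) (ky + p.2) then
      if checkSquare (gset (gset board (kx + p.1) (ky + p.2) ".") kx ky ".")
           (kx + p.1) (ky + p.2) then false
      else matesLoop kx ky board ps
    else matesLoop kx ky board ps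

def mates (base : List (List String)) (kx ky r c : Int) : Bool :=
  matesLoop kx ky (gset base r c "R") pvPairs

def check_alt (grid : List (List String)) (x : Int) (y : Int) (opp_king : Int × Int) : Bool :=
  let base := gset grid x y "."
  (PySem.List.pyRange 0 8 1).any fun r =>
    (PySem.List.pyRange 0 8 1).any fun c =>
      clearPath base x y r c && mates base opp_king.1 opp_king.2 r c

-- ===== PRECONDITION & SPEC =====
-- some neighbour of opp_king lies on the logical 8×8 board (iff safe ever writes)
def pvNE (kx ky : Int) : Prop := ∃ p ∈ pvPairs, inRange (kx + p.1) (ky + p.2) = true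

-- square (i,j) of the logical board physically exists (i, j ≥ 0 from inRange)
def pvPresent (grid : List (List String)) (i j : Int) : Prop :=
  i < (grid.length : Int) ∧ j < ((grid.getD i.toNat []).length : Int)

-- no slide can start: each square adjacent to the rook is off the logical board, or
-- exists and is not '.'
def pvNoAdj (grid : List (List String)) (x y : Int) : Prop :=
  ∀ p ∈ pvDirections, inRange (x + p.1) (y + p.2) = true →
    pvPresent grid (x + p.1) (y + p.2) ∧ gget (gset grid x y ".") (x + p.1) (y + p.2) ≠ "."

-- the whole logical 8×8 board exists, and opp_king's square (touched by safe exactly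
-- when pvNE holds) is on the board and does not read '.' after the origin write
def pvFull (grid : List (List String)) (x y kx ky : Int) : Prop :=
  8 ≤ grid.length ∧ (∀ i : Nat, i < 8 → 8 ≤ (grid.getD i []).length) ∧
  (pvNE kx ky → 0 ≤ kx ∧ kx < (grid.length : Int) ∧ 0 ≤ ky ∧
      ky < ((grid.getD kx.toNat []).length : Int) ∧ gget (gset grid x y ".") kx ky ≠ ".")

-- Pre_check keeps inputs on which no probed square is missing: the rook square on the
-- board (wraparound allowed) and EITHER no slide can start OR the full logical 8×8
-- board present with opp_king's square on-board and not '.'.  Excluded-but-returning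
-- inputs are ragged/short boards that A survives only because its interleaved slide
-- stops before probing a missing square (B's whole-board scan reads one and raises),
-- and boards where safe's in-place restore writes 'k' into a '.' square mid-search,
-- changing later slides — an accident of A's implementation.
def Pre_check (grid : List (List String)) (x : Int) (y : Int) (opp_king : Int × Int) : Prop :=
  (-(grid.length : Int) ≤ x ∧ x < (grid.length : Int) ∧
    -(((grid.getD (rowIdx grid x) []).length : Int)) ≤ y ∧
    y < ((grid.getD (rowIdx grid x) []).length : Int)) ∧
  (pvNoAdj grid x y ∨ pvFull grid x y opp_king.1 opp_king.2)

instance (grid : List (List String)) (x : Int) (y : Int) (opp_king : Int × Int) : Decidable (Pre_check grid x y opp_king) := by unfold Pre_check pvNoAdj pvFull pvNE pvPresent; infer_instance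

def pvWitness_check : List (List String) × Int × Int × (Int × Int) :=
  ([["R", ".", ".", ".", ".", ".", ".", "."],
    [".", ".", ".", ".", ".", ".", ".", "."],
    [".", ".", ".", ".", ".", ".", ".", "."],
    [".", ".", ".", ".", ".", ".", ".", "."],
    [".", ".", ".", ".", ".", ".", ".", "."],
    [".", ".", ".", ".", ".", ".", ".", "."],
    [".", ".", ".", ".", ".", ".", ".", "."],
    [".", ".", ".", ".", ".", ".", ".", "k"]], 0, 0, (7, 7))

def Spec_check (grid : List (List String)) (x : Int) (y : Int) (opp_king : Int × Int) (out : Bool) : Prop := out = check_alt grid x y opp_king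
instance (grid : List (List String)) (x : Int) (y : Int) (opp_king : Int × Int) (out : Bool) : Decidable (Spec_check grid x y opp_king out) := by unfold Spec_check; infer_instance

-- ===== CLAIM (what is proved, stated in full; the proofs are below) =====
def Claim_equal_check : Prop := ∀ (grid : List (List String)) (x : Int) (y : Int) (opp_king : Int × Int), Dom_check grid x y opp_king → Pre_check grid x y opp_king → Spec_check grid x y opp_king (check grid x y opp_king)

-- ===== LEMMAS AND PROOFS =====

-- A's per-direction slide, gathering the reachable '.' squares (proof-side device)
def slide (g : List (List String)) (dx dy : Int) : Int → Int → Nat → List (Int × Int)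
  | _, _, 0 => []
  | nx, ny, n+1 =>
    if inRange nx ny && gget g nx ny == "." then
      (nx, ny) :: slide g dx dy (nx + dx) (ny + dy) n
    else []

-- A's loop together with the grid it threads, over an explicit target list (proof-side)
def bRun (kx ky : Int) : List (Int × Int) → List (List String) → Bool × List (List String)
  | [], g => (false, g)
  | t :: ts, g =>
    let g1 := gset g t.1 t.2 "R"
    let r := safe g1 (kx, ky)
    if !r.1 then (true, r.2)
    else bRun kx ky ts (gset r.2 t.1 t.2 ".")

-- the loop grids of both programs: the starting grid g0, possibly with 'k' on opp_king's cell
def pvRel (g0 : List (List String)) (kx ky : Int) (g : List (List String)) : Prop :=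
  g = g0 ∨ (g = nset g0 (rowIdx g0 kx) (colIdx g0 kx ky) "k" ∧ pvNE kx ky)

-- the per-neighbour escape test that safe accumulates and mates checks
def nbTest (kx ky : Int) (H : List (List String)) (p : Int × Int) : Bool :=
  inRange (kx + p.1) (ky + p.2) &&
    checkSquare (gset (gset H (kx + p.1) (ky + p.2) ".") kx ky ".") (kx + p.1) (ky + p.2)

theorem inRange_iff {a b : Int} :
    inRange a b = true ↔ (0 ≤ a ∧ a < 8) ∧ (0 ≤ b ∧ b < 8) := by
  simp [inRange]

-- ---- Nat-level cell lemmas (unconditional) ----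

theorem nset_nset (g : List (List String)) (r c : Nat) (v w : String) :
    nset (nset g r c v) r c w = nset g r c w := by
  unfold nset
  by_cases hn : r < g.length
  · rw [List.getD_eq_getElem g [] hn,
        List.getD_eq_getElem _ [] (by simpa using hn),
        List.getElem_set_self, List.set_set, List.set_set]
  · have e : ∀ (q : List String), g.set r q = g :=
      fun q => List.set_eq_of_length_le (Nat.le_of_not_lt hn)
    simp only [e]

theorem nset_nget_self (g : List (List String)) (r c : Nat) :
    nset g r c (nget g r c) = g := by
  unfold nset nget
  by_cases hn : r < g.length
  · rw [List.getD_eq_getElem g [] hn]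
    by_cases hm : c < g[r].length
    · rw [List.getD_eq_getElem _ "" hm, List.set_getElem_self, List.set_getElem_self]
    · rw [List.set_eq_of_length_le (Nat.le_of_not_lt hm)]
      exact List.set_getElem_self ..
  · exact List.set_eq_of_length_le (Nat.le_of_not_lt hn)

theorem getD_set_ne {alpha : Type} (l : List alpha) (n n' : Nat) (v d : alpha)
    (h : n ≠ n') : (l.set n v).getD n' d = l.getD n' d := by
  rw [List.getD_eq_getElem?_getD, List.getD_eq_getElem?_getD, List.getElem?_set_ne h]

theorem nget_nset_ne (g : List (List String)) {r c r' c' : Nat}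
    (hne : ¬(r = r' ∧ c = c')) (v : String) :
    nget (nset g r c v) r' c' = nget g r' c' := by
  unfold nget nset
  by_cases hrr : r = r'
  · have hcc : c ≠ c' := fun h => hne ⟨hrr, h⟩
    subst hrr
    by_cases hn : r < g.length
    · have e1 : (g.set r ((g.getD r []).set c v)).getD r []
          = (g.getD r []).set c v := by
        rw [List.getD_eq_getElem _ [] (by simpa using hn), List.getElem_set_self,
            List.getD_eq_getElem g [] hn]
      rw [e1, getD_set_ne _ _ _ _ _ hcc]
    · rw [List.set_eq_of_length_le (Nat.le_of_not_lt hn)]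
  · rw [getD_set_ne _ _ _ _ _ hrr]

theorem nset_comm (g : List (List String)) {r c r' c' : Nat}
    (hne : ¬(r = r' ∧ c = c')) (v w : String) :
    nset (nset g r c v) r' c' w = nset (nset g r' c' w) r c v := by
  unfold nset
  by_cases hrr : r = r'
  · have hcc : c ≠ c' := fun h => hne ⟨hrr, h⟩
    subst hrr
    by_cases hn : r < g.length
    · have e1 : ∀ (q : List String), (g.set r q).getD r [] = q := by
        intro q
        rw [List.getD_eq_getElem _ [] (by simpa using hn), List.getElem_set_self]
      rw [e1, e1, List.set_set, List.set_set, List.set_comm _ _ hcc]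
    · have e : ∀ (q : List String), g.set r q = g :=
        fun q => List.set_eq_of_length_le (Nat.le_of_not_lt hn)
      simp only [e]
  · rw [getD_set_ne _ _ _ _ _ hrr, getD_set_ne _ _ _ _ _ (Ne.symm hrr),
        List.set_comm _ _ hrr]

theorem nset_self_or (g : List (List String)) (r c : Nat) (v : String) :
    nset g r c v = g ∨ nget (nset g r c v) r c = v := by
  unfold nset nget
  by_cases hn : r < g.length
  · by_cases hm : c < (g.getD r []).length
    · right
      rw [List.getD_eq_getElem _ [] (by simpa using hn), List.getElem_set_self,
          List.getD_eq_getElem _ _ (by simpa using hm), List.getElem_set_self]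
    · left
      rw [List.set_eq_of_length_le (Nat.le_of_not_lt hm),
          List.getD_eq_getElem g [] hn]
      exact List.set_getElem_self ..
  · left; exact List.set_eq_of_length_le (Nat.le_of_not_lt hn)

-- ---- shape bookkeeping: nset/gset never change any length ----

def SS (g h : List (List String)) : Prop :=
  g.length = h.length ∧ ∀ n : Nat, (g.getD n []).length = (h.getD n []).length

theorem SS_refl (g : List (List String)) : SS g g := ⟨rfl, fun _ => rfl⟩

theorem SS_trans {g h k : List (List String)} (h1 : SS g h) (h2 : SS h k) : SS g k :=
  ⟨h1.1.trans h2.1, fun n => (h1.2 n).trans (h2.2 n)⟩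

theorem SS_nset (g : List (List String)) (r c : Nat) (v : String) : SS (nset g r c v) g := by
  constructor
  · simp [nset]
  · intro n
    unfold nset
    by_cases hrr : r = n
    · subst hrr
      by_cases hn : r < g.length
      · rw [List.getD_eq_getElem _ [] (by simpa using hn), List.getElem_set_self,
            List.getD_eq_getElem g [] hn]
        simp
      · rw [List.set_eq_of_length_le (Nat.le_of_not_lt hn)]
    · rw [getD_set_ne _ _ _ _ _ hrr]

theorem rowIdx_SS {g h : List (List String)} (hss : SS g h) (i : Int) :
    rowIdx g i = rowIdx h i := by
  unfold rowIdx pyIdx; rw [hss.1]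

theorem colIdx_SS {g h : List (List String)} (hss : SS g h) (i j : Int) :
    colIdx g i j = colIdx h i j := by
  unfold colIdx pyIdx; rw [rowIdx_SS hss, hss.2]

theorem gset_SS {g h : List (List String)} (hss : SS g h) (i j : Int) (v : String) :
    gset g i j v = nset g (rowIdx h i) (colIdx h i j) v := by
  unfold gset; rw [rowIdx_SS hss, colIdx_SS hss]

theorem SS_gset {g h : List (List String)} (hss : SS g h) (i j : Int) (v : String) :
    SS (gset g i j v) h := by
  rw [gset_SS hss]; exact SS_trans (SS_nset ..) hss

-- nonneg coordinates index the same cell on every grid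
theorem rowIdx_nonneg (g : List (List String)) {i : Int} (hi : 0 ≤ i) :
    rowIdx g i = i.toNat := by
  unfold rowIdx pyIdx; rw [if_neg (by omega)]

theorem colIdx_nonneg (g : List (List String)) {i j : Int} (hj : 0 ≤ j) :
    colIdx g i j = j.toNat := by
  unfold colIdx pyIdx; rw [if_neg (by omega)]

theorem gget_nonneg (g : List (List String)) {i j : Int} (hi : 0 ≤ i) (hj : 0 ≤ j) :
    gget g i j = nget g i.toNat j.toNat := by
  unfold gget; rw [rowIdx_nonneg g hi, colIdx_nonneg g hj]

theorem gset_nonneg (g : List (List String)) {i j : Int} (hi : 0 ≤ i) (hj : 0 ≤ j)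
    (v : String) : gset g i j v = nset g i.toNat j.toNat v := by
  unfold gset; rw [rowIdx_nonneg g hi, colIdx_nonneg g hj]

-- ---- safe's net effect: the grid is unchanged, or opp_king's cell was set to 'k' ----

theorem safeStep_net {g0 : List (List String)} {kx ky : Int} (G : List (List String))
    (hss : SS G g0) (ok : Bool) (p : Int × Int) :
    (safeStep kx ky (ok, G) p).2 = G ∨
      ((safeStep kx ky (ok, G) p).2 = nset G (rowIdx g0 kx) (colIdx g0 kx ky) "k" ∧
        inRange (kx + p.1) (ky + p.2) = true) := by
  unfold safeStep
  by_cases hr : inRange (kx + p.1) (ky + p.2) = true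
  · have hb := inRange_iff.mp hr
    rw [if_pos hr]
    show (gset (gset (gset (gset G (kx + p.1) (ky + p.2) ".") kx ky ".") kx ky "k")
            (kx + p.1) (ky + p.2) (gget G (kx + p.1) (ky + p.2)) = G) ∨
         (gset (gset (gset (gset G (kx + p.1) (ky + p.2) ".") kx ky ".") kx ky "k")
            (kx + p.1) (ky + p.2) (gget G (kx + p.1) (ky + p.2))
            = nset G (rowIdx g0 kx) (colIdx g0 kx ky) "k" ∧ _)
    rw [gget_nonneg G (by omega) (by omega),
        gset_nonneg G (by omega) (by omega)]
    have ss1 : SS (nset G (kx + p.1).toNat (ky + p.2).toNat ".") g0 :=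
      SS_trans (SS_nset ..) hss
    rw [gset_SS ss1]
    have ss2 : SS (nset (nset G (kx + p.1).toNat (ky + p.2).toNat ".")
        (rowIdx g0 kx) (colIdx g0 kx ky) ".") g0 := SS_trans (SS_nset ..) ss1
    rw [gset_SS ss2, nset_nset,
        gset_nonneg _ (by omega : (0:Int) ≤ kx + p.1) (by omega : (0:Int) ≤ ky + p.2)]
    by_cases hc : (kx + p.1).toNat = rowIdx g0 kx ∧ (ky + p.2).toNat = colIdx g0 kx ky
    · left
      rw [hc.1, hc.2, nset_nset, nset_nset, ← hc.1, ← hc.2, nset_nget_self]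
    · right
      refine ⟨?_, hr⟩
      rw [nset_comm _ (fun h => hc ⟨h.1.symm, h.2.symm⟩), nset_nset, nset_nget_self]
  · rw [if_neg hr]; exact Or.inl rfl

theorem safe_fold {g0 h : List (List String)} {kx ky : Int} :
    ∀ (l : List (Int × Int)) (ok : Bool) (G : List (List String)), SS G g0 →
      (G = h ∨ (G = nset h (rowIdx g0 kx) (colIdx g0 kx ky) "k" ∧ pvNE kx ky)) →
      (∀ p ∈ l, p ∈ pvPairs) →
      SS (l.foldl (safeStep kx ky) (ok, G)).2 g0 ∧
        ((l.foldl (safeStep kx ky) (ok, G)).2 = h ∨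
          ((l.foldl (safeStep kx ky) (ok, G)).2
              = nset h (rowIdx g0 kx) (colIdx g0 kx ky) "k" ∧ pvNE kx ky)) := by
  intro l
  induction l with
  | nil => intro ok G hss hrel _; exact ⟨hss, hrel⟩
  | cons p l ih =>
    intro ok G hss hrel hmem
    rw [List.foldl_cons]
    have hstep := safeStep_net (g0 := g0) (kx := kx) (ky := ky) G hss ok p
    have hss' : SS (safeStep kx ky (ok, G) p).2 g0 := by
      rcases hstep with h | ⟨h, _⟩
      · rw [h]; exact hss
      · rw [h]; exact SS_trans (SS_nset ..) hss
    have hrel' : (safeStep kx ky (ok, G) p).2 = h ∨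
        ((safeStep kx ky (ok, G) p).2
            = nset h (rowIdx g0 kx) (colIdx g0 kx ky) "k" ∧ pvNE kx ky) := by
      rcases hstep with hcase | ⟨hcase, hinr⟩
      · rw [hcase]; exact hrel
      · rcases hrel with hg | ⟨hg, hne⟩
        · right; rw [hcase, hg]; exact ⟨rfl, ⟨p, hmem p (List.mem_cons_self ..), hinr⟩⟩
        · right; rw [hcase, hg, nset_nset]
          exact ⟨rfl, hne⟩
    have := ih (safeStep kx ky (ok, G) p).1 (safeStep kx ky (ok, G) p).2 hss' hrel'
      (fun q hq => hmem q (List.mem_cons_of_mem _ hq))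
    exact this

theorem safe_net {g0 h : List (List String)} {kx ky : Int} (hss : SS h g0) :
    SS (safe h (kx, ky)).2 g0 ∧
      ((safe h (kx, ky)).2 = h ∨
        ((safe h (kx, ky)).2 = nset h (rowIdx g0 kx) (colIdx g0 kx ky) "k" ∧ pvNE kx ky)) :=
  safe_fold pvPairs false h hss (Or.inl rfl) (fun _ hp => hp)

-- ---- the '.'-test reads the same value through Rel ----

theorem cond_eq {g0 : List (List String)} {kx ky : Int}
    (hC4 : pvNE kx ky → nget g0 (rowIdx g0 kx) (colIdx g0 kx ky) ≠ ".")
    {g : List (List String)} (hrel : pvRel g0 kx ky g) {nx ny : Int}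
    (h0x : 0 ≤ nx) (h0y : 0 ≤ ny) :
    (gget g nx ny == ".") = (gget g0 nx ny == ".") := by
  rcases hrel with hg | ⟨hg, hne⟩
  · rw [hg]
  · rw [gget_nonneg g h0x h0y, gget_nonneg g0 h0x h0y]
    by_cases hcell : rowIdx g0 kx = nx.toNat ∧ colIdx g0 kx ky = ny.toNat
    · have h1 : nget g0 nx.toNat ny.toNat ≠ "." := by
        rw [← hcell.1, ← hcell.2]; exact hC4 hne
      have h2 : nget g nx.toNat ny.toNat ≠ "." := by
        rw [hg, ← hcell.1, ← hcell.2]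
        rcases nset_self_or g0 (rowIdx g0 kx) (colIdx g0 kx ky) "k" with h | h
        · rw [h]; exact hC4 hne
        · rw [h]; decide
      rw [beq_eq_false_iff_ne.mpr h2, beq_eq_false_iff_ne.mpr h1]
    · rw [hg, nget_nset_ne g0 hcell]

theorem rel_restore {g0 : List (List String)} {kx ky : Int}
    {g : List (List String)} (hss : SS g g0) (hrel : pvRel g0 kx ky g) {tx ty : Int}
    (h0x : 0 ≤ tx) (h0y : 0 ≤ ty) (hdot : gget g tx ty = ".") :
    SS (gset (safe (gset g tx ty "R") (kx, ky)).2 tx ty ".") g0 ∧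
      pvRel g0 kx ky (gset (safe (gset g tx ty "R") (kx, ky)).2 tx ty ".") := by
  have hg1 : gset g tx ty "R" = nset g tx.toNat ty.toNat "R" := gset_nonneg g h0x h0y "R"
  have hss1 : SS (gset g tx ty "R") g0 := SS_gset hss tx ty "R"
  obtain ⟨hssr, hnet⟩ := safe_net (kx := kx) (ky := ky) hss1
  have hre : ∀ (H : List (List String)), SS H g0 →
      gset H tx ty "." = nset H tx.toNat ty.toNat "." :=
    fun H _ => gset_nonneg H h0x h0y "."
  have hdot' : nget g tx.toNat ty.toNat = "." := by
    rw [← gget_nonneg g h0x h0y]; exact hdot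
  have hback : nset g tx.toNat ty.toNat "." = g := by
    rw [← hdot', nset_nget_self]
  rw [hre _ hssr]
  rcases hnet with hcase | ⟨hcase, hne⟩
  · rw [hcase, hg1, nset_nset, hback]
    exact ⟨hss, hrel⟩
  · rw [hcase, hg1]
    by_cases hcell : (rowIdx g0 kx) = tx.toNat ∧ (colIdx g0 kx ky) = ty.toNat
    · rw [hcell.1, hcell.2, nset_nset, nset_nset, hback]
      exact ⟨hss, hrel⟩
    · rw [nset_comm _ hcell, nset_nset, hback]
      rcases hrel with hg | ⟨hg, _⟩
      · rw [hg]
        exact ⟨SS_trans (SS_nset ..) (SS_refl g0), Or.inr ⟨rfl, hne⟩⟩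
      · rw [hg, nset_nset]
        exact ⟨SS_trans (SS_nset ..) (SS_refl g0), Or.inr ⟨rfl, hne⟩⟩

-- ---- per-direction: A's interleaved loop = bRun over the slide's target list ----

theorem bRunDef (kx ky : Int) (t : Int × Int) (ts : List (Int × Int)) (g : List (List String)) :
    bRun kx ky (t :: ts) g
      = (if !(safe (gset g t.1 t.2 "R") (kx, ky)).1 then
           (true, (safe (gset g t.1 t.2 "R") (kx, ky)).2)
         else bRun kx ky ts (gset (safe (gset g t.1 t.2 "R") (kx, ky)).2 t.1 t.2 ".")) := rfl

theorem dir_eq {g0 : List (List String)} {kx ky : Int}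
    (hC4 : pvNE kx ky → nget g0 (rowIdx g0 kx) (colIdx g0 kx ky) ≠ ".")
    (dx dy : Int) :
    ∀ (n : Nat) (nx ny : Int) (g : List (List String)), SS g g0 → pvRel g0 kx ky g →
      aDirLoop kx ky dx dy nx ny g n = bRun kx ky (slide g0 dx dy nx ny n) g := by
  intro n
  induction n with
  | zero => intro nx ny g _ _; rfl
  | succ n ih =>
    intro nx ny g hss hrel
    rw [show aDirLoop kx ky dx dy nx ny g (n+1)
          = (if inRange nx ny && gget g nx ny == "." then
               if !(safe (gset g nx ny "R") (kx, ky)).1 then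
                 (true, (safe (gset g nx ny "R") (kx, ky)).2)
               else aDirLoop kx ky dx dy (nx + dx) (ny + dy)
                      (gset (safe (gset g nx ny "R") (kx, ky)).2 nx ny ".") n
             else (false, g)) from rfl]
    rw [show slide g0 dx dy nx ny (n+1)
          = (if inRange nx ny && gget g0 nx ny == "." then
               (nx, ny) :: slide g0 dx dy (nx + dx) (ny + dy) n
             else []) from rfl]
    by_cases hir : inRange nx ny = true
    · have h0 := inRange_iff.mp hir
      have hcond : (gget g nx ny == ".") = (gget g0 nx ny == ".") :=
        cond_eq hC4 hrel h0.1.1 h0.2.1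
      by_cases hc : (inRange nx ny && gget g0 nx ny == ".") = true
      · have hcA : (inRange nx ny && gget g nx ny == ".") = true := by
          rw [Bool.and_eq_true] at hc ⊢; exact ⟨hc.1, hcond.trans hc.2⟩
        have hdot : gget g nx ny = "." := by
          have := (Bool.and_eq_true ..).mp hcA
          simpa using this.2
        rw [if_pos hcA, if_pos hc, bRunDef]
        by_cases hs : (!(safe (gset g nx ny "R") (kx, ky)).1) = true
        · rw [if_pos hs, if_pos hs]
        · rw [if_neg hs, if_neg hs]
          obtain ⟨hss', hrel'⟩ := rel_restore hss hrel h0.1.1 h0.2.1 hdot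
          exact ih (nx + dx) (ny + dy) _ hss' hrel'
      · have hcA : ¬ (inRange nx ny && gget g nx ny == ".") = true := by
          rw [Bool.and_eq_true] at hc ⊢
          intro hh; exact hc ⟨hh.1, hcond.symm.trans hh.2⟩
        rw [if_neg hcA, if_neg hc]; rfl
    · have hf : inRange nx ny = false := by simpa using hir
      rw [hf, Bool.false_and, Bool.false_and,
          if_neg (by decide : ¬ false = true), if_neg (by decide : ¬ false = true)]
      rfl

-- ---- gluing the four directions ----

theorem slide_mem {g0 : List (List String)} {dx dy : Int} :
    ∀ (n : Nat) (nx ny : Int) (t : Int × Int), t ∈ slide g0 dx dy nx ny n →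
      inRange t.1 t.2 = true ∧ nget g0 t.1.toNat t.2.toNat = "." := by
  intro n
  induction n with
  | zero => intro nx ny t h; simp [slide] at h
  | succ n ih =>
    intro nx ny t h
    rw [slide] at h
    split at h
    · rename_i hg
      have hb := inRange_iff.mp ((Bool.and_eq_true ..).mp hg).1
      have hdot : gget g0 nx ny = "." := by
        have := (Bool.and_eq_true ..).mp hg
        simpa using this.2
      rcases List.mem_cons.mp h with h | h
      · subst h
        refine ⟨((Bool.and_eq_true ..).mp hg).1, ?_⟩
        rw [← gget_nonneg g0 hb.1.1 hb.2.1]; exact hdot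
      · exact ih _ _ t h
    · simp at h

theorem bRun_append {kx ky : Int} :
    ∀ (l1 l2 : List (Int × Int)) (g : List (List String)),
      bRun kx ky (l1 ++ l2) g
        = (if (bRun kx ky l1 g).1 then bRun kx ky l1 g
           else bRun kx ky l2 (bRun kx ky l1 g).2) := by
  intro l1
  induction l1 with
  | nil => intro l2 g; rfl
  | cons t l1 ih =>
    intro l2 g
    rw [List.cons_append, bRunDef, bRunDef]
    by_cases hs : (!(safe (gset g t.1 t.2 "R") (kx, ky)).1) = true
    · rw [if_pos hs, if_pos hs, if_pos (by simp)]
    · rw [if_neg hs, if_neg hs, ih]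

-- bRun preserves the shape and (while no win found) the Rel invariant
theorem bRun_props {g0 : List (List String)} {kx ky : Int}
    (hC4 : pvNE kx ky → nget g0 (rowIdx g0 kx) (colIdx g0 kx ky) ≠ ".") :
    ∀ (ts : List (Int × Int)) (g : List (List String)), SS g g0 → pvRel g0 kx ky g →
      (∀ t ∈ ts, inRange t.1 t.2 = true ∧ nget g0 t.1.toNat t.2.toNat = ".") →
      SS (bRun kx ky ts g).2 g0 ∧
        ((bRun kx ky ts g).1 = false → pvRel g0 kx ky (bRun kx ky ts g).2) := by
  intro ts
  induction ts with
  | nil => intro g hss hrel _; exact ⟨hss, fun _ => hrel⟩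
  | cons t ts ih =>
    intro g hss hrel hts
    obtain ⟨htr, htdot⟩ := hts t (List.mem_cons_self ..)
    have hb := inRange_iff.mp htr
    have hdot : gget g t.1 t.2 = "." := by
      have hc := cond_eq hC4 hrel hb.1.1 hb.2.1
      have hg0 : (gget g0 t.1 t.2 == ".") = true := by
        rw [gget_nonneg g0 hb.1.1 hb.2.1]; simpa using htdot
      have := hc.trans hg0
      simpa using this
    rw [bRunDef]
    by_cases hs : (!(safe (gset g t.1 t.2 "R") (kx, ky)).1) = true
    · rw [if_pos hs]
      refine ⟨(safe_net (kx := kx) (ky := ky) (SS_gset hss t.1 t.2 "R")).1, ?_⟩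
      intro h; exact absurd h (by simp)
    · rw [if_neg hs]
      obtain ⟨hss', hrel'⟩ := rel_restore hss hrel hb.1.1 hb.2.1 hdot
      exact ih _ hss' hrel' (fun q hq => hts q (List.mem_cons_of_mem _ hq))

theorem foldl_stay_true {kx ky x y : Int} :
    ∀ (l : List (Int × Int)) (st : Bool × List (List String)), st.1 = true →
      l.foldl (fun st d => if st.1 then st
          else aDirLoop kx ky d.1 d.2 (x + d.1) (y + d.2) st.2 8) st = st := by
  intro l
  induction l with
  | nil => intro st _; rfl
  | cons d l ih =>
    intro st hst
    rw [List.foldl_cons, if_pos hst, ih st hst]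

theorem fold_eq {g0 : List (List String)} {kx ky x y : Int}
    (hC4 : pvNE kx ky → nget g0 (rowIdx g0 kx) (colIdx g0 kx ky) ≠ ".") :
    ∀ (ds : List (Int × Int)) (g : List (List String)), SS g g0 → pvRel g0 kx ky g →
      ds.foldl (fun st d => if st.1 then st
          else aDirLoop kx ky d.1 d.2 (x + d.1) (y + d.2) st.2 8) (false, g)
        = bRun kx ky (ds.flatMap (fun d => slide g0 d.1 d.2 (x + d.1) (y + d.2) 8)) g := by
  intro ds
  induction ds with
  | nil => intro g _ _; rfl
  | cons d ds ih =>
    intro g hss hrel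
    rw [List.foldl_cons, List.flatMap_cons,
        if_neg (by simp : ¬ ((false, g) : Bool × List (List String)).1 = true)]
    have hA : aDirLoop kx ky d.1 d.2 (x + d.1) (y + d.2) ((false, g) : Bool × List (List String)).2 8
        = bRun kx ky (slide g0 d.1 d.2 (x + d.1) (y + d.2) 8) g :=
      dir_eq hC4 d.1 d.2 8 (x + d.1) (y + d.2) g hss hrel
    rw [hA, bRun_append]
    have hprops := bRun_props hC4 (slide g0 d.1 d.2 (x + d.1) (y + d.2) 8) g hss hrel
      (fun t ht => slide_mem 8 (x + d.1) (y + d.2) t ht)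
    by_cases hw : (bRun kx ky (slide g0 d.1 d.2 (x + d.1) (y + d.2) 8) g).1 = true
    · rw [if_pos hw, foldl_stay_true _ _ hw]
    · have hw' : (bRun kx ky (slide g0 d.1 d.2 (x + d.1) (y + d.2) 8) g).1 = false := by
        simpa using hw
      rw [if_neg hw]
      have hpair : bRun kx ky (slide g0 d.1 d.2 (x + d.1) (y + d.2) 8) g
          = (false, (bRun kx ky (slide g0 d.1 d.2 (x + d.1) (y + d.2) 8) g).2) :=
        Prod.ext hw' rfl
      rw [hpair]
      exact ih _ hprops.1 (hprops.2 hw')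

-- ---- safe's boolean is a pure `any` over the nine neighbour tests ----

theorem matesLoop_any {kx ky : Int} (board : List (List String)) :
    ∀ (l : List (Int × Int)), matesLoop kx ky board l = !(l.any (nbTest kx ky board)) := by
  intro l
  induction l with
  | nil => rfl
  | cons p ps ih =>
    rw [show matesLoop kx ky board (p :: ps)
          = (if inRange (kx + p.1) (ky + p.2) then
               if checkSquare (gset (gset board (kx + p.1) (ky + p.2) ".") kx ky ".")
                    (kx + p.1) (ky + p.2) then false
               else matesLoop kx ky board ps
             else matesLoop kx ky board ps) from rfl,
        List.any_cons, ih]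
    by_cases h1 : inRange (kx + p.1) (ky + p.2) = true
    · rw [if_pos h1]
      by_cases h2 : checkSquare (gset (gset board (kx + p.1) (ky + p.2) ".") kx ky ".")
          (kx + p.1) (ky + p.2) = true
      · rw [if_pos h2]
        have : nbTest kx ky board p = true := by
          unfold nbTest; rw [h1, h2]; rfl
        rw [this]; rfl
      · rw [if_neg h2]
        have : nbTest kx ky board p = false := by
          unfold nbTest; rw [h1]
          simpa using h2
        rw [this]; rfl
    · rw [if_neg h1]
      have : nbTest kx ky board p = false := by
        unfold nbTest
        rw [Bool.eq_false_iff.mpr h1]; rfl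
      rw [this]; rfl

theorem safe_any {g0 : List (List String)} {kx ky : Int}
    (hkb : pvNE kx ky → 0 ≤ kx ∧ 0 ≤ ky) :
    ∀ (l : List (Int × Int)) (ok : Bool) (G H : List (List String)),
      (∀ p ∈ l, p ∈ pvPairs) → SS G g0 → SS H g0 →
      nset G kx.toNat ky.toNat "." = nset H kx.toNat ky.toNat "." →
      (l.foldl (safeStep kx ky) (ok, G)).1 = (ok || l.any (nbTest kx ky H)) := by
  intro l
  induction l with
  | nil => intro ok G H _ _ _ _; simp
  | cons p ps ih =>
    intro ok G H hmem hssG hssH hE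
    rw [List.foldl_cons, List.any_cons]
    by_cases hr : inRange (kx + p.1) (ky + p.2) = true
    · have hne : pvNE kx ky := ⟨p, hmem p (List.mem_cons_self ..), hr⟩
      obtain ⟨hkx, hky⟩ := hkb hne
      have hb := inRange_iff.mp hr
      -- the board read by checkSquare is the same through E
      have hboard : gset (gset G (kx + p.1) (ky + p.2) ".") kx ky "."
          = gset (gset H (kx + p.1) (ky + p.2) ".") kx ky "." := by
        rw [gset_nonneg G (by omega) (by omega), gset_nonneg H (by omega) (by omega),
            gset_nonneg _ hkx hky, gset_nonneg _ hkx hky]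
        by_cases hc : (kx + p.1).toNat = kx.toNat ∧ (ky + p.2).toNat = ky.toNat
        · rw [hc.1, hc.2, nset_nset, nset_nset, hE]
        · rw [nset_comm _ hc, nset_comm _ hc, hE]
      have hstep : safeStep kx ky (ok, G) p
          = (ok || checkSquare (gset (gset G (kx + p.1) (ky + p.2) ".") kx ky ".")
               (kx + p.1) (ky + p.2), (safeStep kx ky (ok, G) p).2) := by
        simp only [safeStep, hr, if_true]
      have hnb : nbTest kx ky H p
          = checkSquare (gset (gset G (kx + p.1) (ky + p.2) ".") kx ky ".")
              (kx + p.1) (ky + p.2) := by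
        unfold nbTest
        rw [hr, hboard, Bool.true_and]
      -- the restored grid keeps SS and E
      have hnet := safeStep_net (g0 := g0) (kx := kx) (ky := ky) G hssG ok p
      have hssG' : SS (safeStep kx ky (ok, G) p).2 g0 := by
        rcases hnet with h | ⟨h, _⟩
        · rw [h]; exact hssG
        · rw [h]; exact SS_trans (SS_nset ..) hssG
      have hE' : nset (safeStep kx ky (ok, G) p).2 kx.toNat ky.toNat "."
          = nset H kx.toNat ky.toNat "." := by
        rcases hnet with h | ⟨h, _⟩
        · rw [h]; exact hE
        · rw [h, rowIdx_nonneg g0 hkx, colIdx_nonneg g0 hky, nset_nset]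
          exact hE
      rw [hstep, ih _ _ _ (fun q hq => hmem q (List.mem_cons_of_mem _ hq)) hssG' hssH hE',
          hnb, Bool.or_assoc]
    · have hskip : safeStep kx ky (ok, G) p = (ok, G) := by
        conv_lhs => rw [safeStep]
        rw [if_neg hr]
      have hnb : nbTest kx ky H p = false := by
        unfold nbTest
        rw [Bool.eq_false_iff.mpr hr]; rfl
      rw [hskip, ih _ _ _ (fun q hq => hmem q (List.mem_cons_of_mem _ hq)) hssG hssH hE,
          hnb, Bool.false_or]

theorem safe1_eq {g0 : List (List String)} {kx ky : Int}
    (hkb : pvNE kx ky → 0 ≤ kx ∧ 0 ≤ ky) {G H : List (List String)}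
    (hssG : SS G g0) (hssH : SS H g0)
    (hE : nset G kx.toNat ky.toNat "." = nset H kx.toNat ky.toNat ".") :
    (safe G (kx, ky)).1 = pvPairs.any (nbTest kx ky H) := by
  have := safe_any (g0 := g0) hkb pvPairs false G H (fun _ hp => hp) hssG hssH hE
  simpa [safe] using this

-- bRun's boolean is a pure `any` over the target list
theorem bRun_any {g0 : List (List String)} {kx ky : Int}
    (hkb : pvNE kx ky → 0 ≤ kx ∧ 0 ≤ ky)
    (hC4 : pvNE kx ky → nget g0 (rowIdx g0 kx) (colIdx g0 kx ky) ≠ ".") :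
    ∀ (ts : List (Int × Int)) (g : List (List String)), SS g g0 → pvRel g0 kx ky g →
      (∀ t ∈ ts, inRange t.1 t.2 = true ∧ nget g0 t.1.toNat t.2.toNat = ".") →
      (bRun kx ky ts g).1
        = ts.any (fun t => !(pvPairs.any (nbTest kx ky (gset g0 t.1 t.2 "R")))) := by
  intro ts
  induction ts with
  | nil => intro g _ _ _; rfl
  | cons t ts ih =>
    intro g hss hrel hts
    obtain ⟨htr, htdot⟩ := hts t (List.mem_cons_self ..)
    have hb := inRange_iff.mp htr
    have hE : nset (gset g t.1 t.2 "R") kx.toNat ky.toNat "."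
        = nset (gset g0 t.1 t.2 "R") kx.toNat ky.toNat "." := by
      rw [gset_nonneg g hb.1.1 hb.2.1, gset_nonneg g0 hb.1.1 hb.2.1]
      rcases hrel with hg | ⟨hg, hne⟩
      · rw [hg]
      · obtain ⟨hkx, hky⟩ := hkb hne
        rw [hg, rowIdx_nonneg g0 hkx, colIdx_nonneg g0 hky]
        by_cases hc : t.1.toNat = kx.toNat ∧ t.2.toNat = ky.toNat
        · rw [hc.1, hc.2, nset_nset, nset_nset, nset_nset]
        · rw [nset_comm _ (fun h => hc ⟨h.1.symm, h.2.symm⟩), nset_nset]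
    have hsafe : (safe (gset g t.1 t.2 "R") (kx, ky)).1
        = pvPairs.any (nbTest kx ky (gset g0 t.1 t.2 "R")) :=
      safe1_eq hkb (SS_gset hss t.1 t.2 "R") (SS_gset (SS_refl g0) t.1 t.2 "R") hE
    rw [bRunDef, List.any_cons]
    by_cases hs : (!(safe (gset g t.1 t.2 "R") (kx, ky)).1) = true
    · rw [if_pos hs]
      have : (!(pvPairs.any (nbTest kx ky (gset g0 t.1 t.2 "R")))) = true := by
        rw [← hsafe]; exact hs
      rw [this, Bool.true_or]
    · rw [if_neg hs]
      have hfalse : (!(pvPairs.any (nbTest kx ky (gset g0 t.1 t.2 "R")))) = false := by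
        rw [← hsafe]; simpa using hs
      have hdot : gget g t.1 t.2 = "." := by
        have hc := cond_eq hC4 hrel hb.1.1 hb.2.1
        have hg0 : (gget g0 t.1 t.2 == ".") = true := by
          rw [gget_nonneg g0 hb.1.1 hb.2.1]; simpa using htdot
        have := hc.trans hg0
        simpa using this
      obtain ⟨hss', hrel'⟩ := rel_restore hss hrel hb.1.1 hb.2.1 hdot
      rw [ih _ hss' hrel' (fun q hq => hts q (List.mem_cons_of_mem _ hq)), hfalse,
          Bool.false_or]

-- ---- geometry: clearPath characterises membership in the slide target lists ----

theorem slide_form {g0 : List (List String)} {dx dy : Int} :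
    ∀ (n : Nat) (i j : Int) (t : Int × Int), t ∈ slide g0 dx dy i j n →
      ∃ k : Nat, t.1 = i + k * dx ∧ t.2 = j + k * dy := by
  intro n
  induction n with
  | zero => intro i j t h; simp [slide] at h
  | succ n ih =>
    intro i j t h
    rw [slide] at h
    split at h
    · rcases List.mem_cons.mp h with h | h
      · subst h; exact ⟨0, by simp, by simp⟩
      · obtain ⟨k, h1, h2⟩ := ih _ _ t h
        exact ⟨k + 1, by rw [h1]; push_cast; ring, by rw [h2]; push_cast; ring⟩
    · simp at h

theorem slide_to_walk {g0 : List (List String)} {dx dy r c : Int}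
    (hnz : ¬(dx = 0 ∧ dy = 0)) :
    ∀ (n : Nat) (i j : Int), (r, c) ∈ slide g0 dx dy i j n →
      walkPath g0 dx dy r c i j n = true := by
  intro n
  induction n with
  | zero => intro i j h; simp [slide] at h
  | succ n ih =>
    intro i j h
    rw [slide] at h
    split at h
    · rename_i hg
      rcases List.mem_cons.mp h with h | h
      · have h1 : r = i := congrArg Prod.fst h
        have h2 : c = j := congrArg Prod.snd h
        subst h1; subst h2
        rw [walkPath, if_pos ⟨rfl, rfl⟩]
        exact ((Bool.and_eq_true ..).mp hg).2
      · have hne : ¬(i = r ∧ j = c) := by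
          obtain ⟨k, h1, h2⟩ := slide_form n (i + dx) (j + dy) (r, c) h
          simp only at h1 h2
          rintro ⟨rfl, rfl⟩
          have hdx : ((k : Int) + 1) * dx = 0 := by rw [add_mul, one_mul]; omega
          have hdy : ((k : Int) + 1) * dy = 0 := by rw [add_mul, one_mul]; omega
          have hk : ((k : Int) + 1) ≠ 0 := by omega
          rcases mul_eq_zero.mp hdx with h | h
          · exact absurd h hk
          · rcases mul_eq_zero.mp hdy with h' | h'
            · exact absurd h' hk
            · exact hnz ⟨h, h'⟩
        rw [walkPath, if_neg hne, hg, if_pos rfl]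
        exact ih _ _ h
    · simp at h

theorem walk_to_slide {g0 : List (List String)} {dx dy r c : Int}
    (hr : inRange r c = true) :
    ∀ (n : Nat) (i j : Int), walkPath g0 dx dy r c i j n = true →
      (r, c) ∈ slide g0 dx dy i j n := by
  intro n
  induction n with
  | zero => intro i j h; simp [walkPath] at h
  | succ n ih =>
    intro i j h
    rw [walkPath] at h
    rw [slide]
    split at h
    · rename_i he
      obtain ⟨rfl, rfl⟩ := he
      rw [if_pos (by rw [hr, Bool.true_and]; exact h)]
      exact List.mem_cons_self ..
    · split at h
      · rename_i hg
        rw [if_pos hg]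
        exact List.mem_cons_of_mem _ (ih _ _ h)
      · exact absurd h (by simp)

-- the flatMap of the four slides, as scanned by A (proof-side abbreviation)
def Tlist (g0 : List (List String)) (x y : Int) : List (Int × Int) :=
  pvDirections.flatMap (fun d => slide g0 d.1 d.2 (x + d.1) (y + d.2) 8)

theorem clearPath_mem {g0 : List (List String)} {x y r c : Int}
    (hr : inRange r c = true) :
    clearPath g0 x y r c = true ↔ (r, c) ∈ Tlist g0 x y := by
  constructor
  · intro h
    unfold clearPath at h
    by_cases hg : (r = x ∧ c = y) ∨ (r ≠ x ∧ c ≠ y)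
    · rw [if_pos hg] at h; exact absurd h (by simp)
    · rw [if_neg hg] at h
      push_neg at hg
      rcases eq_or_ne r x with hrx | hrx
      · -- vertical: r = x, c ≠ y
        have hcy : c ≠ y := by
          intro hcy; exact (hg.1 hrx hcy).elim
        have h1 : (r - x).sign = 0 := by rw [hrx]; simp
        rcases lt_or_gt_of_ne hcy with hlt | hgt
        · have h2 : (c - y).sign = -1 := Int.sign_eq_neg_one_iff_neg.mpr (by omega)
          rw [h1, h2] at h
          refine List.mem_flatMap.mpr ⟨(0, -1), by simp [pvDirections], ?_⟩
          have := walk_to_slide hr 8 (x + 0) (y + -1) h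
          simpa using this
        · have h2 : (c - y).sign = 1 := Int.sign_eq_one_iff_pos.mpr (by omega)
          rw [h1, h2] at h
          refine List.mem_flatMap.mpr ⟨(0, 1), by simp [pvDirections], ?_⟩
          have := walk_to_slide hr 8 (x + 0) (y + 1) h
          simpa using this
      · -- horizontal: r ≠ x, c = y
        have hcy : c = y := hg.2 hrx
        have h2 : (c - y).sign = 0 := by rw [hcy]; simp
        rcases lt_or_gt_of_ne hrx with hlt | hgt
        · have h1 : (r - x).sign = -1 := Int.sign_eq_neg_one_iff_neg.mpr (by omega)
          rw [h1, h2] at h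
          refine List.mem_flatMap.mpr ⟨(-1, 0), by simp [pvDirections], ?_⟩
          have := walk_to_slide hr 8 (x + -1) (y + 0) h
          simpa using this
        · have h1 : (r - x).sign = 1 := Int.sign_eq_one_iff_pos.mpr (by omega)
          rw [h1, h2] at h
          refine List.mem_flatMap.mpr ⟨(1, 0), by simp [pvDirections], ?_⟩
          have := walk_to_slide hr 8 (x + 1) (y + 0) h
          simpa using this
  · intro h
    obtain ⟨d, hd, hmem⟩ := List.mem_flatMap.mp h
    have hform := slide_form 8 (x + d.1) (y + d.2) (r, c) hmem
    obtain ⟨k, h1, h2⟩ := hform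
    simp only at h1 h2
    have hnz : ¬(d.1 = 0 ∧ d.2 = 0) := by
      simp only [pvDirections, List.mem_cons, List.not_mem_nil, or_false] at hd
      rcases hd with h | h | h | h <;> (rw [h]; simp)
    have hwalk := slide_to_walk hnz 8 (x + d.1) (y + d.2) hmem
    unfold clearPath
    simp only [pvDirections, List.mem_cons, List.not_mem_nil, or_false] at hd
    rcases hd with hdd | hdd | hdd | hdd <;> rw [hdd] at h1 h2 hwalk <;>
      simp only at h1 h2 hwalk
    · have hrx : x < r := by omega
      have hcy : c = y := by omega
      rw [if_neg (by omega), Int.sign_eq_one_iff_pos.mpr (by omega : 0 < r - x),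
          (by omega : c - y = 0), Int.sign_zero]
      simpa using hwalk
    · have hrx : r < x := by omega
      have hcy : c = y := by omega
      rw [if_neg (by omega), Int.sign_eq_neg_one_iff_neg.mpr (by omega : r - x < 0),
          (by omega : c - y = 0), Int.sign_zero]
      simpa using hwalk
    · have hrx : r = x := by omega
      have hcy : y < c := by omega
      rw [if_neg (by omega), (by omega : r - x = 0), Int.sign_zero,
          Int.sign_eq_one_iff_pos.mpr (by omega : 0 < c - y)]
      simpa using hwalk
    · have hrx : r = x := by omega
      have hcy : c < y := by omega
      rw [if_neg (by omega), (by omega : r - x = 0), Int.sign_zero,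
          Int.sign_eq_neg_one_iff_neg.mpr (by omega : c - y < 0)]
      simpa using hwalk

theorem pyRange8 : PySem.List.pyRange 0 8 1 = [0, 1, 2, 3, 4, 5, 6, 7] := by decide

-- ---- the no-adjacent-'.' case: both programs find nothing ----

theorem noadj_cond {grid : List (List String)} {x y : Int} (hna : pvNoAdj grid x y)
    {d : Int × Int} (hd : d ∈ pvDirections) :
    (inRange (x + d.1) (y + d.2) && gget (gset grid x y ".") (x + d.1) (y + d.2) == ".") = false := by
  by_cases hi : inRange (x + d.1) (y + d.2) = true
  · obtain ⟨-, hval⟩ := hna d hd hi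
    rw [hi, Bool.true_and, beq_eq_false_iff_ne.mpr hval]
  · have hf : inRange (x + d.1) (y + d.2) = false := by simpa using hi
    rw [hf, Bool.false_and]

theorem fold_noop {g0 : List (List String)} {kx ky x y : Int} :
    ∀ (ds : List (Int × Int)),
      (∀ d ∈ ds, aDirLoop kx ky d.1 d.2 (x + d.1) (y + d.2) g0 8 = (false, g0)) →
      ds.foldl (fun st d => if st.1 then st
          else aDirLoop kx ky d.1 d.2 (x + d.1) (y + d.2) st.2 8) (false, g0) = (false, g0) := by
  intro ds
  induction ds with
  | nil => intro _; rfl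
  | cons d ds ih =>
    intro h
    rw [List.foldl_cons, if_neg (by simp : ¬ ((false, g0) : Bool × List (List String)).1 = true),
        h d (List.mem_cons_self ..)]
    exact ih (fun q hq => h q (List.mem_cons_of_mem _ hq))

-- under pvNoAdj, the very first step of every clearPath walk fails
theorem noadj_clearPath {grid : List (List String)} {x y : Int} (hna : pvNoAdj grid x y)
    {r c : Int} (hr : inRange r c = true) :
    clearPath (gset grid x y ".") x y r c = false := by
  unfold clearPath
  by_cases hg : (r = x ∧ c = y) ∨ (r ≠ x ∧ c ≠ y)
  · rw [if_pos hg]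
  · rw [if_neg hg]
    push_neg at hg
    have hstep : ∀ (dx dy : Int), (dx, dy) ∈ pvDirections →
        walkPath (gset grid x y ".") dx dy r c (x + dx) (y + dy) 8 = false := by
      intro dx dy hd
      have hcond := noadj_cond hna hd
      simp only at hcond
      rw [walkPath]
      by_cases he : x + dx = r ∧ y + dy = c
      · rw [if_pos he]
        have hi : inRange (x + dx) (y + dy) = true := by rw [he.1, he.2]; exact hr
        rw [hi, Bool.true_and] at hcond
        rw [← he.1, ← he.2]
        exact hcond
      · rw [if_neg he, hcond, if_neg (by decide : ¬ false = true)]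
    rcases eq_or_ne r x with hrx | hrx
    · have hcy : c ≠ y := fun hcy => (hg.1 hrx hcy).elim
      rcases lt_or_gt_of_ne hcy with hlt | hgt
      · rw [(by omega : r - x = 0), Int.sign_zero,
            Int.sign_eq_neg_one_iff_neg.mpr (by omega : c - y < 0)]
        exact hstep 0 (-1) (by simp [pvDirections])
      · rw [(by omega : r - x = 0), Int.sign_zero,
            Int.sign_eq_one_iff_pos.mpr (by omega : 0 < c - y)]
        exact hstep 0 1 (by simp [pvDirections])
    · have hcy : c = y := hg.2 hrx
      rcases lt_or_gt_of_ne hrx with hlt | hgt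
      · rw [Int.sign_eq_neg_one_iff_neg.mpr (by omega : r - x < 0),
            (by omega : c - y = 0), Int.sign_zero]
        exact hstep (-1) 0 (by simp [pvDirections])
      · rw [Int.sign_eq_one_iff_pos.mpr (by omega : 0 < r - x),
            (by omega : c - y = 0), Int.sign_zero]
        exact hstep 1 0 (by simp [pvDirections])

-- ===== VERDICT (by name: the statement is the Claim_ definition above) =====
theorem check_spec : Claim_equal_check := by
  intro grid x y k _ hpre
  obtain ⟨hC1, hcase⟩ := hpre
  unfold Spec_check check check_alt
  show (pvDirections.foldl
      (fun st d => if st.1 then st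
                   else aDirLoop k.1 k.2 d.1 d.2 (x + d.1) (y + d.2) st.2 8)
      (false, gset grid x y ".")).1
    = ((PySem.List.pyRange 0 8 1).any fun r =>
        (PySem.List.pyRange 0 8 1).any fun c =>
          clearPath (gset grid x y ".") x y r c
            && mates (gset grid x y ".") k.1 k.2 r c)
  rcases hcase with hna | hfull
  · -- no slide can start: both sides are false
    have hstep : ∀ d ∈ pvDirections,
        aDirLoop k.1 k.2 d.1 d.2 (x + d.1) (y + d.2) (gset grid x y ".") 8
          = (false, gset grid x y ".") := by
      intro d hd
      rw [show aDirLoop k.1 k.2 d.1 d.2 (x + d.1) (y + d.2) (gset grid x y ".") 8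
            = (if inRange (x + d.1) (y + d.2) &&
                    gget (gset grid x y ".") (x + d.1) (y + d.2) == "." then
                 if !(safe (gset (gset grid x y ".") (x + d.1) (y + d.2) "R") (k.1, k.2)).1 then
                   (true, (safe (gset (gset grid x y ".") (x + d.1) (y + d.2) "R") (k.1, k.2)).2)
                 else aDirLoop k.1 k.2 d.1 d.2 (x + d.1 + d.1) (y + d.2 + d.2)
                        (gset (safe (gset (gset grid x y ".") (x + d.1) (y + d.2) "R") (k.1, k.2)).2
                          (x + d.1) (y + d.2) ".") 7
               else (false, gset grid x y ".")) from rfl]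
      rw [noadj_cond hna hd, if_neg (by decide : ¬ false = true)]
    rw [fold_noop pvDirections hstep]
    have hB : ∀ r ∈ PySem.List.pyRange 0 8 1, ∀ c ∈ PySem.List.pyRange 0 8 1,
        (clearPath (gset grid x y ".") x y r c
          && mates (gset grid x y ".") k.1 k.2 r c) = false := by
      intro r hrm c hcm
      rw [pyRange8] at hrm hcm
      have hr : inRange r c = true := by
        rw [inRange_iff]
        simp only [List.mem_cons, List.not_mem_nil, or_false] at hrm hcm
        omega
      rw [noadj_clearPath hna hr, Bool.false_and]
    have hBfalse : ((PySem.List.pyRange 0 8 1).any fun r =>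
        (PySem.List.pyRange 0 8 1).any fun c =>
          clearPath (gset grid x y ".") x y r c
            && mates (gset grid x y ".") k.1 k.2 r c) = false := by
      rw [List.any_eq_false]
      intro r hrm
      rw [Bool.not_eq_true, List.any_eq_false]
      intro c hcm
      simp [hB r hrm c hcm]
    rw [hBfalse]
  · -- full board: both sides are the same existential over reachable squares
    obtain ⟨hlen, hrows, hkimp⟩ := hfull
    have hkb : pvNE k.1 k.2 → 0 ≤ k.1 ∧ 0 ≤ k.2 :=
      fun hne => ⟨(hkimp hne).1, (hkimp hne).2.2.1⟩
    have hC4 : pvNE k.1 k.2 →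
        nget (gset grid x y ".") (rowIdx (gset grid x y ".") k.1)
          (colIdx (gset grid x y ".") k.1 k.2) ≠ "." := by
      intro hne
      exact (hkimp hne).2.2.2.2
    rw [fold_eq hC4 pvDirections (gset grid x y ".") (SS_refl _) (Or.inl rfl)]
    have hTmem : ∀ t ∈ Tlist (gset grid x y ".") x y,
        inRange t.1 t.2 = true ∧ nget (gset grid x y ".") t.1.toNat t.2.toNat = "." := by
      intro t ht
      obtain ⟨d, hd, hmem⟩ := List.mem_flatMap.mp ht
      exact slide_mem 8 (x + d.1) (y + d.2) t hmem
    rw [show pvDirections.flatMap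
          (fun d => slide (gset grid x y ".") d.1 d.2 (x + d.1) (y + d.2) 8)
        = Tlist (gset grid x y ".") x y from rfl]
    rw [bRun_any hkb hC4 (Tlist (gset grid x y ".") x y) (gset grid x y ".")
      (SS_refl _) (Or.inl rfl) hTmem]
    -- both sides are Booleans; compare them as existentials
    rw [Bool.eq_iff_iff]
    constructor
    · intro h
      obtain ⟨t, htT, htval⟩ := List.any_eq_true.mp h
      obtain ⟨htr, -⟩ := hTmem t htT
      have hb := inRange_iff.mp htr
      refine List.any_eq_true.mpr ⟨t.1, ?_, List.any_eq_true.mpr ⟨t.2, ?_, ?_⟩⟩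
      · rw [pyRange8]; simp only [List.mem_cons, List.not_mem_nil, or_false]; omega
      · rw [pyRange8]; simp only [List.mem_cons, List.not_mem_nil, or_false]; omega
      · have hcp : clearPath (gset grid x y ".") x y t.1 t.2 = true :=
          (clearPath_mem htr).mpr (by rwa [Prod.mk.eta])
        rw [hcp, Bool.true_and]
        rw [mates, matesLoop_any]
        exact htval
    · intro h
      obtain ⟨r, hrm, hrest⟩ := List.any_eq_true.mp h
      obtain ⟨c, hcm, hval⟩ := List.any_eq_true.mp hrest
      rw [pyRange8] at hrm hcm
      have hr : inRange r c = true := by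
        rw [inRange_iff]
        simp only [List.mem_cons, List.not_mem_nil, or_false] at hrm hcm
        omega
      obtain ⟨hcp, hmt⟩ := (Bool.and_eq_true ..).mp hval
      refine List.any_eq_true.mpr ⟨(r, c), (clearPath_mem hr).mp hcp, ?_⟩
      rw [mates, matesLoop_any] at hmt
      exact hmt
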